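-- pv_equiv track=rewrite | github.com/mattbruv/bfbbtools | vtable.py | processTableBytes
-- ===== SOURCE A (Python) =====
-- def processTableBytes(data):
--     l = list(data)
--     l = list(map(lambda x: hex(x)[2:].zfill(2), l))
--     addrs = []
--     i = 1
--     s = ""
--     for byte in l:
--         s += byte
--         i += 1
--         if i == 5:
--             addrs.append(s)
--             s = ""
--             i = 1
--     return addrs
-- ===== SOURCE B (Python) =====
-- def processTableBytes(data):
--     hexes = [hex(x)[2:].zfill(2) for x in data]
--     return ["".join(g) for g in zip(*[iter(hexes)] * 4)]
-- ===== Notes on version B (the rewrite author's own statement) =====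
-- stated objective: idiomatic
-- what changed: Replaces the counter-and-accumulator loop (i, s, append on i==5) with a comprehension of 2-digit hex strings grouped by the zip(*[iter(...)]*4) idiom, which drops a trailing incomplete group naturally.
import Mathlib
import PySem

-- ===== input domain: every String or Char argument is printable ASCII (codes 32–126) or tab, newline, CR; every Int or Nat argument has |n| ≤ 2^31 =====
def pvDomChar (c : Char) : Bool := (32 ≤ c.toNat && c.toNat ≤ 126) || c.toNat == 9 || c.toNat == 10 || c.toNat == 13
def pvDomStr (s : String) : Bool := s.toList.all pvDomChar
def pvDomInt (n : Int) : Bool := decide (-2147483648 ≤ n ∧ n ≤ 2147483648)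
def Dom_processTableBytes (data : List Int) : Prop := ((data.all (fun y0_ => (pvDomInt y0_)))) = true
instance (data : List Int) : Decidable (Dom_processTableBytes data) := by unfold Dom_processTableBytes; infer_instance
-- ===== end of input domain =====

-- B groups the per-byte hex strings with zip(*[iter]*4) instead of A's counter-driven accumulator loop; same value everywhere (idiomatic rewrite, no speed claim).

-- ===== PORT A =====
-- hex(x)[2:].zfill(2), exact by hand: hex(x) = ("-" if x<0 else "") ++ "0x" ++ lowercase digits of |x|,
-- so [2:] leaves the digits for x ≥ 0 and "x" ++ digits for x < 0; zfill is PySem.Str.zfill.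
def pvByteHex (x : Int) : String :=
  PySem.Str.zfill ((if x < 0 then "x" else "") ++ String.ofList (Nat.toDigits 16 x.natAbs)) 2

-- A's for-loop over the hex strings, with its state (addrs, i, s), as structural recursion.
def pvLoopA : List String → List String → Int → String → List String
  | [], addrs, _, _ => addrs
  | byte :: rest, addrs, i, s =>
    let s' := s ++ byte
    let i' := i + 1
    if i' == 5 then pvLoopA rest (addrs ++ [s']) 1 "" else pvLoopA rest addrs i' s'

def processTableBytes (data : List Int) : List String :=
  pvLoopA (data.map pvByteHex) [] 1 ""

-- ===== PORT B =====
-- zip(*[iter(hexes)]*4) with "".join: take four at a time, drop any incomplete tail.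
def pvChunks4 : List String → List String
  | [] => []
  | [_] => []
  | [_, _] => []
  | [_, _, _] => []
  | a :: b :: c :: d :: t => (a ++ b ++ c ++ d) :: pvChunks4 t

def processTableBytes_alt (data : List Int) : List String :=
  pvChunks4 (data.map pvByteHex)

-- ===== PRECONDITION & SPEC =====
def Spec_processTableBytes (data : List Int) (out : List String) : Prop := out = processTableBytes_alt data
instance (data : List Int) (out : List String) : Decidable (Spec_processTableBytes data out) := by unfold Spec_processTableBytes; infer_instance

-- ===== CLAIM (what is proved, stated in full; the proofs are below) =====
def Claim_equal_processTableBytes : Prop := ∀ (data : List Int), Dom_processTableBytes data → Spec_processTableBytes data (processTableBytes data)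

-- ===== LEMMAS AND PROOFS =====
theorem pvLoopA_chunks (l : List String) : ∀ (addrs : List String),
    pvLoopA l addrs 1 "" = addrs ++ pvChunks4 l := by
  induction l using pvChunks4.induct with
  | case5 a b c d t ih =>
      intro addrs
      simp [pvLoopA, pvChunks4, ih]
  | _ => intro addrs; simp [pvLoopA, pvChunks4]

-- ===== VERDICT (by name: the statement is the Claim_ definition above) =====
theorem processTableBytes_spec : Claim_equal_processTableBytes := by
  intro data _
  unfold Spec_processTableBytes processTableBytes processTableBytes_alt
  simpa using pvLoopA_chunks (data.map pvByteHex) []
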